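-- pv_equiv track=rewrite | github.com/rhobots-ai/rhobots-flow | services/automation/backend/app/services/data_loader.py | _normalize_record
-- ===== SOURCE A (Python) =====
-- from typing import Dict, List, Iterable
--
-- def _canonicalize_key(key: str) -> str:
--     return key.strip().lower().replace(" ", "_")
--
-- def _normalize_record(record: Dict[str, str]) -> Dict[str, str]:
--     canonical = { _canonicalize_key(k): (v if v is not None else "") for k, v in record.items() }
--
--     key_map = {
--         "start_location": ["start", "start_location", "startlocation", "from", "from_location"],
--         "end_location": ["end", "end_location", "endlocation", "to", "to_location"],
--         "price": ["price", "amount", "fare", "cost"],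
--     }
--
--     normalized: Dict[str, str] = {"start_location": "", "end_location": "", "price": ""}
--     for target, aliases in key_map.items():
--         for alias in aliases:
--             if alias in canonical and str(canonical[alias]).strip() != "":
--                 normalized[target] = str(canonical[alias])
--                 break
--
--     missing = [k for k, v in normalized.items() if v == ""]
--     if missing:
--         raise ValueError(f"Missing or empty values for required columns: {', '.join(missing)}")
--
--     return normalized
-- ===== SOURCE B (Python) =====
-- def _canonicalize_key(key: str) -> str:
--     return key.strip().lower().replace(" ", "_")
--
-- _KEY_MAP = {
--     "start_location": ["start", "start_location", "startlocation", "from", "from_location"],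
--     "end_location": ["end", "end_location", "endlocation", "to", "to_location"],
--     "price": ["price", "amount", "fare", "cost"],
-- }
--
-- # inverted index: alias -> (target, rank); lower rank = higher priority
-- _ALIAS_MAP = {alias: (target, rank)
--               for target, aliases in _KEY_MAP.items()
--               for rank, alias in enumerate(aliases)}
--
-- def _normalize_record(record):
--     canonical = {_canonicalize_key(k): (v if v is not None else "") for k, v in record.items()}
--     normalized = {"start_location": "", "end_location": "", "price": ""}
--     best = {"start_location": 10**9, "end_location": 10**9, "price": 10**9}
--     for key, value in canonical.items():
--         hit = _ALIAS_MAP.get(key)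
--         if hit is None:
--             continue
--         target, rank = hit
--         if str(value).strip() != "" and rank < best[target]:
--             normalized[target] = str(value)
--             best[target] = rank
--     missing = [k for k, v in normalized.items() if v == ""]
--     if missing:
--         raise ValueError(f"Missing or empty values for required columns: {', '.join(missing)}")
--     return normalized
-- ===== Notes on version B (the rewrite author's own statement) =====
-- stated objective: alternative
-- what changed: Replaces A's per-target scan over the alias lists (with repeated dict membership tests) by an inverted alias->(target,rank) index and a single pass over the canonical items that keeps the best (lowest) rank seen per target.
import Mathlib
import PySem

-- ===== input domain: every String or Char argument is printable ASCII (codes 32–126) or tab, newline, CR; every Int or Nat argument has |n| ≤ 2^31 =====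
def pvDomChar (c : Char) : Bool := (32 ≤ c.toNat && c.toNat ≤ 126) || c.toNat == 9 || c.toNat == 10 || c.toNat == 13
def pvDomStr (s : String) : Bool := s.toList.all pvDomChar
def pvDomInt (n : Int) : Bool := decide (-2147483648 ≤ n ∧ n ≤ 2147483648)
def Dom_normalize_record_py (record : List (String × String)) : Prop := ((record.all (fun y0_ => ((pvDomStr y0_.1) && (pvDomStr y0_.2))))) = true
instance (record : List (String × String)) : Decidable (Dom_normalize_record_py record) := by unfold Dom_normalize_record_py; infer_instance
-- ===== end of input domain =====

-- B replaces A's per-target scan over alias lists by an inverted alias→(target,rank) index and a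
-- single pass over the canonical items keeping the best (lowest) rank per target; objective: alternative.

-- ===== PORT A =====
-- _canonicalize_key
def canonKey (s : String) : String :=
  PySem.Str.replace (PySem.Str.lower (PySem.Str.strip s)) " " "_"

-- the canonical-dict comprehension shared by both programs (values are never None on the typed domain)
def canonOf (record : List (String × String)) : PySem.Dict String String :=
  record.foldl (fun d kv => d.insert (canonKey kv.1) kv.2) PySem.Dict.empty

def keyMapPV : List (String × List String) :=
  [("start_location", ["start", "start_location", "startlocation", "from", "from_location"]),
   ("end_location", ["end", "end_location", "endlocation", "to", "to_location"]),
   ("price", ["price", "amount", "fare", "cost"])]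

-- A's inner 'for alias in aliases: … break' loop
def findAlias (canonical : PySem.Dict String String) : List String → Option String
  | [] => none
  | a :: rest =>
    match canonical.get? a with
    | some v => if PySem.Str.strip v ≠ "" then some v else findAlias canonical rest
    | none => findAlias canonical rest

def normalize_record_py (record : List (String × String)) : List (String × String) :=
  let canonical := canonOf record
  let normalized := keyMapPV.foldl (fun n ta =>
      match findAlias canonical ta.2 with
      | some v => n.insert ta.1 v
      | none => n)
    (PySem.Dict.ofList [("start_location", ""), ("end_location", ""), ("price", "")])
  -- Python raises ValueError iff some normalized value is "" (the 'missing' check); Pre_ excludes those inputs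
  normalized.items

-- ===== PORT B =====
-- the _ALIAS_MAP comprehension: alias -> (target, rank)
def aliasMapPV : PySem.Dict String (String × Int) :=
  keyMapPV.foldl (fun m ta =>
    (PySem.List.enumerate ta.2).foldl (fun m ra => m.insert ra.2 (ta.1, ra.1)) m)
    PySem.Dict.empty

-- the body of B's single 'for key, value in canonical.items()' loop
def stepB (s : PySem.Dict String String × PySem.Dict String Int) (kv : String × String) :
    PySem.Dict String String × PySem.Dict String Int :=
  match aliasMapPV.get? kv.1 with
  | none => s
  | some tr =>
    if PySem.Str.strip kv.2 ≠ "" ∧ tr.2 < s.2.getD tr.1 1000000000 then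
      (s.1.insert tr.1 kv.2, s.2.insert tr.1 tr.2)
    else s

def normalize_record_py_alt (record : List (String × String)) : List (String × String) :=
  let canonical := canonOf record
  let fin := canonical.items.foldl stepB
    (PySem.Dict.ofList [("start_location", ""), ("end_location", ""), ("price", "")],
     PySem.Dict.ofList [("start_location", (1000000000 : Int)), ("end_location", 1000000000), ("price", 1000000000)])
  -- same 'missing' ValueError check as A, outside Pre_
  fin.1.items

-- ===== PRECONDITION & SPEC =====
-- Exactly the inputs where the Python returns instead of raising ValueError: every one of the three
-- targets has some alias bound in the canonicalized record to a value with non-empty strip.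
def Pre_normalize_record_py (record : List (String × String)) : Prop :=
  ∀ ta ∈ keyMapPV, ∃ a ∈ ta.2,
    ((canonOf record).get? a).any (fun v => PySem.Str.strip v != "") = true
instance (record : List (String × String)) : Decidable (Pre_normalize_record_py record) := by
  unfold Pre_normalize_record_py; infer_instance

def pvWitness_normalize_record_py : (List (String × String)) :=
  [("Start", "a"), ("End", "b"), ("Price", "3")]

def Spec_normalize_record_py (record : List (String × String)) (out : List (String × String)) : Prop := out = normalize_record_py_alt record
instance (record : List (String × String)) (out : List (String × String)) : Decidable (Spec_normalize_record_py record out) := by unfold Spec_normalize_record_py; infer_instance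

-- ===== CLAIM (what is proved, stated in full; the proofs are below) =====
def Claim_equal_normalize_record_py : Prop := ∀ (record : List (String × String)), Dom_normalize_record_py record → Pre_normalize_record_py record → Spec_normalize_record_py record (normalize_record_py record)

-- ===== LEMMAS AND PROOFS =====

def pvLs : List String := ["start", "start_location", "startlocation", "from", "from_location"]
def pvLe : List String := ["end", "end_location", "endlocation", "to", "to_location"]
def pvLp : List String := ["price", "amount", "fare", "cost"]

def mk3 (a b c : String) : PySem.Dict String String :=
  PySem.Dict.mk [("start_location", a), ("end_location", b), ("price", c)]
def mk3i (x y z : Int) : PySem.Dict String Int :=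
  PySem.Dict.mk [("start_location", x), ("end_location", y), ("price", z)]

def hitA (c : PySem.Dict String String) (a : String) : Bool :=
  match c.get? a with
  | some w => PySem.Str.strip w != ""
  | none => false

-- scan of an alias list from index i, accepting only ranks < b; returns (value, rank) or (v, b)
def GR (c : PySem.Dict String String) : List String → Int → Int → String → String × Int
  | [], _, b, v => (v, b)
  | a :: rest, i, b, v =>
    if i < b ∧ hitA c a = true then (c.getD a "", i) else GR c rest (i + 1) b v

theorem GR_stop (c : PySem.Dict String String) :
    ∀ (L : List String) (i b : Int) (v : String), b ≤ i → GR c L i b v = (v, b) := by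
  intro L
  induction L with
  | nil => intro i b v _; rfl
  | cons a rest ih =>
    intro i b v h
    rw [GR, if_neg (fun hc => absurd hc.1 (by omega))]
    exact ih (i + 1) b v (by omega)
theorem GR_nil_dict : ∀ (L : List String) (i b : Int) (v : String),
    GR (PySem.Dict.mk []) L i b v = (v, b) := by
  intro L
  induction L with
  | nil => intro i b v; rfl
  | cons a rest ih =>
    intro i b v
    rw [GR, if_neg (by simp [hitA, PySem.Dict.get?])]
    exact ih (i + 1) b v

theorem GR_cons_notmem (k w : String) (rest : List (String × String)) :
    ∀ (L : List String) (i b : Int) (v : String), k ∉ L →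
      GR (PySem.Dict.mk ((k, w) :: rest)) L i b v = GR (PySem.Dict.mk rest) L i b v := by
  intro L
  induction L with
  | nil => intro i b v _; rfl
  | cons a L' ih =>
    intro i b v hk
    have hak : (k == a) = false := by
      simp only [List.mem_cons, not_or] at hk
      simp [hk.1]
    rw [GR, GR, show hitA (PySem.Dict.mk ((k, w) :: rest)) a = hitA (PySem.Dict.mk rest) a by
          simp [hitA, PySem.Dict.get?_mk_cons, hak],
        show (PySem.Dict.mk ((k, w) :: rest)).getD a "" = (PySem.Dict.mk rest).getD a "" by
          simp [PySem.Dict.getD_eq_get?_getD, PySem.Dict.get?_mk_cons, hak]]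
    split
    · rfl
    · exact ih (i + 1) b v (fun h => hk (List.mem_cons_of_mem _ h))

theorem GR_cons_alias (L1 L2 : List String) (k w : String) (rest : List (String × String))
    (h1 : k ∉ L1) (h2 : k ∉ L2) (h3 : k ∉ rest.map Prod.fst) :
    ∀ (i b : Int) (v : String),
      GR (PySem.Dict.mk ((k, w) :: rest)) (L1 ++ k :: L2) i b v =
        if PySem.Str.strip w ≠ "" ∧ i + L1.length < b then
          GR (PySem.Dict.mk rest) (L1 ++ k :: L2) i (i + L1.length) w
        else
          GR (PySem.Dict.mk rest) (L1 ++ k :: L2) i b v := by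
  have hrest : (PySem.Dict.mk rest).get? k = none := by
    rw [PySem.Dict.get?_eq_none_iff_not_mem_keys]
    simpa [PySem.Dict.keys] using h3
  induction L1 with
  | nil =>
    intro i b v
    simp only [List.nil_append, List.length_nil, Nat.cast_zero, add_zero]
    simp only [GR]
    have hhit : hitA (PySem.Dict.mk ((k, w) :: rest)) k = (PySem.Str.strip w != "") := by
      simp [hitA, PySem.Dict.get?_mk_cons]
    have hhit' : hitA (PySem.Dict.mk rest) k = false := by simp [hitA, hrest]
    have hgd : (PySem.Dict.mk ((k, w) :: rest)).getD k "" = w := by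
      simp [PySem.Dict.getD_eq_get?_getD, PySem.Dict.get?_mk_cons]
    rw [hhit, hhit', hgd]
    by_cases hs : PySem.Str.strip w ≠ ""
    · by_cases hib : i < b
      · rw [if_pos (⟨hib, by simpa using hs⟩ : i < b ∧ (PySem.Str.strip w != "") = true),
            if_pos (⟨hs, hib⟩ : PySem.Str.strip w ≠ "" ∧ i < b),
            if_neg (by simp), GR_stop _ L2 (i + 1) i w (by omega)]
      · rw [if_neg (fun hc => hib hc.1), if_neg (fun hc => hib hc.2),
            if_neg (fun hc => by simp at hc),
            GR_cons_notmem k w rest L2 _ _ _ h2]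
    · rw [if_neg (fun hc => by simp at hs; simp [hs] at hc), if_neg (fun hc => hs hc.1),
          if_neg (fun hc => by simp at hc),
          GR_cons_notmem k w rest L2 _ _ _ h2]
  | cons a L1' ih =>
    intro i b v
    have hka : (k == a) = false := by
      simp only [List.mem_cons, not_or] at h1
      simp [h1.1]
    have h1' : k ∉ L1' := fun h => h1 (List.mem_cons_of_mem _ h)
    have hhit : hitA (PySem.Dict.mk ((k, w) :: rest)) a = hitA (PySem.Dict.mk rest) a := by
      simp [hitA, PySem.Dict.get?_mk_cons, hka]
    have hgd : (PySem.Dict.mk ((k, w) :: rest)).getD a "" = (PySem.Dict.mk rest).getD a "" := by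
      simp [PySem.Dict.getD_eq_get?_getD, PySem.Dict.get?_mk_cons, hka]
    have hlen : ((a :: L1').length : Int) = (L1'.length : Int) + 1 := by
      push_cast [List.length_cons]; ring
    by_cases houter : PySem.Str.strip w ≠ "" ∧ i + ((a :: L1').length : Int) < b
    · rw [if_pos houter]
      have hib : i < b := by rw [hlen] at houter; omega
      have hilen : i < i + ((a :: L1').length : Int) := by rw [hlen]; omega
      rw [List.cons_append]
      simp only [GR]
      rw [hhit, hgd]
      by_cases hh : hitA (PySem.Dict.mk rest) a = true
      · rw [if_pos ⟨hib, hh⟩, if_pos ⟨hilen, hh⟩]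
      · rw [if_neg (fun hc => hh hc.2), if_neg (fun hc => hh hc.2), ih h1' (i + 1) b v,
            if_pos (⟨houter.1, by rw [hlen] at houter; omega⟩ :
              PySem.Str.strip w ≠ "" ∧ i + 1 + (L1'.length : Int) < b)]
        congr 1
        rw [hlen]; ring
    · rw [if_neg houter]
      rw [List.cons_append]
      simp only [GR]
      rw [hhit, hgd]
      by_cases hc : i < b ∧ hitA (PySem.Dict.mk rest) a = true
      · rw [if_pos hc, if_pos hc]
      · rw [if_neg hc, if_neg hc, ih h1' (i + 1) b v,
            if_neg (fun hcc => houter ⟨hcc.1, by rw [hlen]; omega⟩)]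

theorem GR_eq_findAlias (c : PySem.Dict String String) :
    ∀ (L : List String) (i b : Int) (v : String), i + L.length ≤ b →
      (GR c L i b v).1 = (findAlias c L).getD v := by
  intro L
  induction L with
  | nil => intro i b v _; rfl
  | cons a rest ih =>
    intro i b v hb
    have hib : i < b := by simp at hb; omega
    rw [GR, findAlias]
    cases hg : c.get? a with
    | none =>
      rw [if_neg (by simp [hitA, hg])]
      exact ih (i + 1) b v (by simp at hb ⊢; omega)
    | some w =>
      by_cases hs : PySem.Str.strip w ≠ ""
      · rw [if_pos ⟨hib, by simp [hitA, hg, hs]⟩]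
        simp [hs, hg, PySem.Dict.getD_eq_get?_getD]
      · rw [if_neg (by simp [hitA, hg]; simp at hs; simp [hs])]
        dsimp only
        rw [if_neg hs]
        exact ih (i + 1) b v (by simp at hb ⊢; omega)

theorem aliasMapPV_items : aliasMapPV.items =
    [("start", ("start_location", 0)), ("start_location", ("start_location", 1)),
     ("startlocation", ("start_location", 2)), ("from", ("start_location", 3)),
     ("from_location", ("start_location", 4)), ("end", ("end_location", 0)),
     ("end_location", ("end_location", 1)), ("endlocation", ("end_location", 2)),
     ("to", ("end_location", 3)), ("to_location", ("end_location", 4)),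
     ("price", ("price", 0)), ("amount", ("price", 1)), ("fare", ("price", 2)),
     ("cost", ("price", 3))] := by decide

theorem aliasMapPV_none_notmem (k : String) (h : aliasMapPV.get? k = none) :
    k ∉ pvLs ∧ k ∉ pvLe ∧ k ∉ pvLp := by
  rw [PySem.Dict.get?_eq_none_iff_not_mem_keys] at h
  refine ⟨fun hm => h ?_, fun hm => h ?_, fun hm => h ?_⟩ <;> (fin_cases hm <;> decide)

theorem getD_mk3i_S (x y z : Int) : (mk3i x y z).getD "start_location" 1000000000 = x := rfl
theorem getD_mk3i_E (x y z : Int) : (mk3i x y z).getD "end_location" 1000000000 = y := rfl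
theorem getD_mk3i_P (x y z : Int) : (mk3i x y z).getD "price" 1000000000 = z := rfl
theorem ins_mk3_S (a b c v : String) : (mk3 a b c).insert "start_location" v = mk3 v b c := rfl
theorem ins_mk3_E (a b c v : String) : (mk3 a b c).insert "end_location" v = mk3 a v c := rfl
theorem ins_mk3_P (a b c v : String) : (mk3 a b c).insert "price" v = mk3 a b v := rfl

theorem foldB_eq : ∀ (xs : List (String × String)) (a b c : String) (x y z : Int),
    (xs.map Prod.fst).Nodup →
    xs.foldl stepB (mk3 a b c, mk3i x y z)
      = (mk3 (GR (PySem.Dict.mk xs) pvLs 0 x a).1 (GR (PySem.Dict.mk xs) pvLe 0 y b).1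
             (GR (PySem.Dict.mk xs) pvLp 0 z c).1,
         mk3i (GR (PySem.Dict.mk xs) pvLs 0 x a).2 (GR (PySem.Dict.mk xs) pvLe 0 y b).2
             (GR (PySem.Dict.mk xs) pvLp 0 z c).2) := by
  intro xs
  induction xs with
  | nil => intro a b c x y z _; simp [GR_nil_dict]
  | cons kv xs' ih =>
    intro a b c x y z hnd
    obtain ⟨k, w⟩ := kv
    simp only [List.map_cons, List.nodup_cons] at hnd
    obtain ⟨htl, htl2⟩ := hnd
    cases h : aliasMapPV.get? k with
    | none =>
      obtain ⟨hn1, hn2, hn3⟩ := aliasMapPV_none_notmem k h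
      rw [List.foldl_cons,
          show stepB (mk3 a b c, mk3i x y z) (k, w) = (mk3 a b c, mk3i x y z) by
            simp [stepB, h],
          ih a b c x y z htl2,
          GR_cons_notmem k w xs' pvLs 0 x a hn1,
          GR_cons_notmem k w xs' pvLe 0 y b hn2,
          GR_cons_notmem k w xs' pvLp 0 z c hn3]
    | some tr =>
      have hm := PySem.Dict.mem_items_of_get?_eq_some _ h
      rw [aliasMapPV_items] at hm
      simp only [List.mem_cons, List.not_mem_nil, or_false, Prod.mk.injEq] at hm
      rcases hm with ⟨rfl, rfl⟩|⟨rfl, rfl⟩|⟨rfl, rfl⟩|⟨rfl, rfl⟩|⟨rfl, rfl⟩|⟨rfl, rfl⟩|⟨rfl, rfl⟩|⟨rfl, rfl⟩|⟨rfl, rfl⟩|⟨rfl, rfl⟩|⟨rfl, rfl⟩|⟨rfl, rfl⟩|⟨rfl, rfl⟩|⟨rfl, rfl⟩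
      · -- k = "start"
        rw [List.foldl_cons]
        by_cases hcond : PySem.Str.strip w ≠ "" ∧ (0 : Int) < x
        · have hstep : stepB (mk3 a b c, mk3i x y z) ("start", w) = (mk3 w b c, mk3i 0 y z) := by
            simp only [stepB, h, getD_mk3i_S]
            rw [if_pos hcond]
            rfl
          rw [hstep, ih w b c 0 y z htl2]
          have e1 : GR (PySem.Dict.mk (("start", w) :: xs')) pvLs 0 x a = GR (PySem.Dict.mk xs') pvLs 0 0 w := by
            rw [show pvLs = [] ++ "start" :: ["start_location", "startlocation", "from", "from_location"] from rfl,
                GR_cons_alias _ _ _ _ _ (by decide) (by decide) htl,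
                if_pos ⟨hcond.1, by norm_num [hcond.2]⟩]
            norm_num
          rw [e1,
            GR_cons_notmem "start" w xs' pvLe 0 y b (by decide),
            GR_cons_notmem "start" w xs' pvLp 0 z c (by decide)]
        · have hstep : stepB (mk3 a b c, mk3i x y z) ("start", w) = (mk3 a b c, mk3i x y z) := by
            simp only [stepB, h, getD_mk3i_S]
            rw [if_neg hcond]
          rw [hstep, ih a b c x y z htl2]
          have e1 : GR (PySem.Dict.mk (("start", w) :: xs')) pvLs 0 x a = GR (PySem.Dict.mk xs') pvLs 0 x a := by
            rw [show pvLs = [] ++ "start" :: ["start_location", "startlocation", "from", "from_location"] from rfl,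
                GR_cons_alias _ _ _ _ _ (by decide) (by decide) htl,
                if_neg (fun hc => hcond ⟨hc.1, by have := hc.2; norm_num at this; omega⟩)]
          rw [e1,
            GR_cons_notmem "start" w xs' pvLe 0 y b (by decide),
            GR_cons_notmem "start" w xs' pvLp 0 z c (by decide)]

      · -- k = "start_location"
        rw [List.foldl_cons]
        by_cases hcond : PySem.Str.strip w ≠ "" ∧ (1 : Int) < x
        · have hstep : stepB (mk3 a b c, mk3i x y z) ("start_location", w) = (mk3 w b c, mk3i 1 y z) := by
            simp only [stepB, h, getD_mk3i_S]
            rw [if_pos hcond]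
            rfl
          rw [hstep, ih w b c 1 y z htl2]
          have e1 : GR (PySem.Dict.mk (("start_location", w) :: xs')) pvLs 0 x a = GR (PySem.Dict.mk xs') pvLs 0 1 w := by
            rw [show pvLs = ["start"] ++ "start_location" :: ["startlocation", "from", "from_location"] from rfl,
                GR_cons_alias _ _ _ _ _ (by decide) (by decide) htl,
                if_pos ⟨hcond.1, by norm_num [hcond.2]⟩]
            norm_num
          rw [e1,
            GR_cons_notmem "start_location" w xs' pvLe 0 y b (by decide),
            GR_cons_notmem "start_location" w xs' pvLp 0 z c (by decide)]
        · have hstep : stepB (mk3 a b c, mk3i x y z) ("start_location", w) = (mk3 a b c, mk3i x y z) := by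
            simp only [stepB, h, getD_mk3i_S]
            rw [if_neg hcond]
          rw [hstep, ih a b c x y z htl2]
          have e1 : GR (PySem.Dict.mk (("start_location", w) :: xs')) pvLs 0 x a = GR (PySem.Dict.mk xs') pvLs 0 x a := by
            rw [show pvLs = ["start"] ++ "start_location" :: ["startlocation", "from", "from_location"] from rfl,
                GR_cons_alias _ _ _ _ _ (by decide) (by decide) htl,
                if_neg (fun hc => hcond ⟨hc.1, by have := hc.2; norm_num at this; omega⟩)]
          rw [e1,
            GR_cons_notmem "start_location" w xs' pvLe 0 y b (by decide),
            GR_cons_notmem "start_location" w xs' pvLp 0 z c (by decide)]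

      · -- k = "startlocation"
        rw [List.foldl_cons]
        by_cases hcond : PySem.Str.strip w ≠ "" ∧ (2 : Int) < x
        · have hstep : stepB (mk3 a b c, mk3i x y z) ("startlocation", w) = (mk3 w b c, mk3i 2 y z) := by
            simp only [stepB, h, getD_mk3i_S]
            rw [if_pos hcond]
            rfl
          rw [hstep, ih w b c 2 y z htl2]
          have e1 : GR (PySem.Dict.mk (("startlocation", w) :: xs')) pvLs 0 x a = GR (PySem.Dict.mk xs') pvLs 0 2 w := by
            rw [show pvLs = ["start", "start_location"] ++ "startlocation" :: ["from", "from_location"] from rfl,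
                GR_cons_alias _ _ _ _ _ (by decide) (by decide) htl,
                if_pos ⟨hcond.1, by norm_num [hcond.2]⟩]
            norm_num
          rw [e1,
            GR_cons_notmem "startlocation" w xs' pvLe 0 y b (by decide),
            GR_cons_notmem "startlocation" w xs' pvLp 0 z c (by decide)]
        · have hstep : stepB (mk3 a b c, mk3i x y z) ("startlocation", w) = (mk3 a b c, mk3i x y z) := by
            simp only [stepB, h, getD_mk3i_S]
            rw [if_neg hcond]
          rw [hstep, ih a b c x y z htl2]
          have e1 : GR (PySem.Dict.mk (("startlocation", w) :: xs')) pvLs 0 x a = GR (PySem.Dict.mk xs') pvLs 0 x a := by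
            rw [show pvLs = ["start", "start_location"] ++ "startlocation" :: ["from", "from_location"] from rfl,
                GR_cons_alias _ _ _ _ _ (by decide) (by decide) htl,
                if_neg (fun hc => hcond ⟨hc.1, by have := hc.2; norm_num at this; omega⟩)]
          rw [e1,
            GR_cons_notmem "startlocation" w xs' pvLe 0 y b (by decide),
            GR_cons_notmem "startlocation" w xs' pvLp 0 z c (by decide)]

      · -- k = "from"
        rw [List.foldl_cons]
        by_cases hcond : PySem.Str.strip w ≠ "" ∧ (3 : Int) < x
        · have hstep : stepB (mk3 a b c, mk3i x y z) ("from", w) = (mk3 w b c, mk3i 3 y z) := by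
            simp only [stepB, h, getD_mk3i_S]
            rw [if_pos hcond]
            rfl
          rw [hstep, ih w b c 3 y z htl2]
          have e1 : GR (PySem.Dict.mk (("from", w) :: xs')) pvLs 0 x a = GR (PySem.Dict.mk xs') pvLs 0 3 w := by
            rw [show pvLs = ["start", "start_location", "startlocation"] ++ "from" :: ["from_location"] from rfl,
                GR_cons_alias _ _ _ _ _ (by decide) (by decide) htl,
                if_pos ⟨hcond.1, by norm_num [hcond.2]⟩]
            norm_num
          rw [e1,
            GR_cons_notmem "from" w xs' pvLe 0 y b (by decide),
            GR_cons_notmem "from" w xs' pvLp 0 z c (by decide)]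
        · have hstep : stepB (mk3 a b c, mk3i x y z) ("from", w) = (mk3 a b c, mk3i x y z) := by
            simp only [stepB, h, getD_mk3i_S]
            rw [if_neg hcond]
          rw [hstep, ih a b c x y z htl2]
          have e1 : GR (PySem.Dict.mk (("from", w) :: xs')) pvLs 0 x a = GR (PySem.Dict.mk xs') pvLs 0 x a := by
            rw [show pvLs = ["start", "start_location", "startlocation"] ++ "from" :: ["from_location"] from rfl,
                GR_cons_alias _ _ _ _ _ (by decide) (by decide) htl,
                if_neg (fun hc => hcond ⟨hc.1, by have := hc.2; norm_num at this; omega⟩)]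
          rw [e1,
            GR_cons_notmem "from" w xs' pvLe 0 y b (by decide),
            GR_cons_notmem "from" w xs' pvLp 0 z c (by decide)]

      · -- k = "from_location"
        rw [List.foldl_cons]
        by_cases hcond : PySem.Str.strip w ≠ "" ∧ (4 : Int) < x
        · have hstep : stepB (mk3 a b c, mk3i x y z) ("from_location", w) = (mk3 w b c, mk3i 4 y z) := by
            simp only [stepB, h, getD_mk3i_S]
            rw [if_pos hcond]
            rfl
          rw [hstep, ih w b c 4 y z htl2]
          have e1 : GR (PySem.Dict.mk (("from_location", w) :: xs')) pvLs 0 x a = GR (PySem.Dict.mk xs') pvLs 0 4 w := by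
            rw [show pvLs = ["start", "start_location", "startlocation", "from"] ++ "from_location" :: [] from rfl,
                GR_cons_alias _ _ _ _ _ (by decide) (by decide) htl,
                if_pos ⟨hcond.1, by norm_num [hcond.2]⟩]
            norm_num
          rw [e1,
            GR_cons_notmem "from_location" w xs' pvLe 0 y b (by decide),
            GR_cons_notmem "from_location" w xs' pvLp 0 z c (by decide)]
        · have hstep : stepB (mk3 a b c, mk3i x y z) ("from_location", w) = (mk3 a b c, mk3i x y z) := by
            simp only [stepB, h, getD_mk3i_S]
            rw [if_neg hcond]
          rw [hstep, ih a b c x y z htl2]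
          have e1 : GR (PySem.Dict.mk (("from_location", w) :: xs')) pvLs 0 x a = GR (PySem.Dict.mk xs') pvLs 0 x a := by
            rw [show pvLs = ["start", "start_location", "startlocation", "from"] ++ "from_location" :: [] from rfl,
                GR_cons_alias _ _ _ _ _ (by decide) (by decide) htl,
                if_neg (fun hc => hcond ⟨hc.1, by have := hc.2; norm_num at this; omega⟩)]
          rw [e1,
            GR_cons_notmem "from_location" w xs' pvLe 0 y b (by decide),
            GR_cons_notmem "from_location" w xs' pvLp 0 z c (by decide)]

      · -- k = "end"
        rw [List.foldl_cons]
        by_cases hcond : PySem.Str.strip w ≠ "" ∧ (0 : Int) < y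
        · have hstep : stepB (mk3 a b c, mk3i x y z) ("end", w) = (mk3 a w c, mk3i x 0 z) := by
            simp only [stepB, h, getD_mk3i_E]
            rw [if_pos hcond]
            rfl
          rw [hstep, ih a w c x 0 z htl2]
          have e1 : GR (PySem.Dict.mk (("end", w) :: xs')) pvLe 0 y b = GR (PySem.Dict.mk xs') pvLe 0 0 w := by
            rw [show pvLe = [] ++ "end" :: ["end_location", "endlocation", "to", "to_location"] from rfl,
                GR_cons_alias _ _ _ _ _ (by decide) (by decide) htl,
                if_pos ⟨hcond.1, by norm_num [hcond.2]⟩]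
            norm_num
          rw [e1,
            GR_cons_notmem "end" w xs' pvLs 0 x a (by decide),
            GR_cons_notmem "end" w xs' pvLp 0 z c (by decide)]
        · have hstep : stepB (mk3 a b c, mk3i x y z) ("end", w) = (mk3 a b c, mk3i x y z) := by
            simp only [stepB, h, getD_mk3i_E]
            rw [if_neg hcond]
          rw [hstep, ih a b c x y z htl2]
          have e1 : GR (PySem.Dict.mk (("end", w) :: xs')) pvLe 0 y b = GR (PySem.Dict.mk xs') pvLe 0 y b := by
            rw [show pvLe = [] ++ "end" :: ["end_location", "endlocation", "to", "to_location"] from rfl,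
                GR_cons_alias _ _ _ _ _ (by decide) (by decide) htl,
                if_neg (fun hc => hcond ⟨hc.1, by have := hc.2; norm_num at this; omega⟩)]
          rw [e1,
            GR_cons_notmem "end" w xs' pvLs 0 x a (by decide),
            GR_cons_notmem "end" w xs' pvLp 0 z c (by decide)]

      · -- k = "end_location"
        rw [List.foldl_cons]
        by_cases hcond : PySem.Str.strip w ≠ "" ∧ (1 : Int) < y
        · have hstep : stepB (mk3 a b c, mk3i x y z) ("end_location", w) = (mk3 a w c, mk3i x 1 z) := by
            simp only [stepB, h, getD_mk3i_E]
            rw [if_pos hcond]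
            rfl
          rw [hstep, ih a w c x 1 z htl2]
          have e1 : GR (PySem.Dict.mk (("end_location", w) :: xs')) pvLe 0 y b = GR (PySem.Dict.mk xs') pvLe 0 1 w := by
            rw [show pvLe = ["end"] ++ "end_location" :: ["endlocation", "to", "to_location"] from rfl,
                GR_cons_alias _ _ _ _ _ (by decide) (by decide) htl,
                if_pos ⟨hcond.1, by norm_num [hcond.2]⟩]
            norm_num
          rw [e1,
            GR_cons_notmem "end_location" w xs' pvLs 0 x a (by decide),
            GR_cons_notmem "end_location" w xs' pvLp 0 z c (by decide)]
        · have hstep : stepB (mk3 a b c, mk3i x y z) ("end_location", w) = (mk3 a b c, mk3i x y z) := by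
            simp only [stepB, h, getD_mk3i_E]
            rw [if_neg hcond]
          rw [hstep, ih a b c x y z htl2]
          have e1 : GR (PySem.Dict.mk (("end_location", w) :: xs')) pvLe 0 y b = GR (PySem.Dict.mk xs') pvLe 0 y b := by
            rw [show pvLe = ["end"] ++ "end_location" :: ["endlocation", "to", "to_location"] from rfl,
                GR_cons_alias _ _ _ _ _ (by decide) (by decide) htl,
                if_neg (fun hc => hcond ⟨hc.1, by have := hc.2; norm_num at this; omega⟩)]
          rw [e1,
            GR_cons_notmem "end_location" w xs' pvLs 0 x a (by decide),
            GR_cons_notmem "end_location" w xs' pvLp 0 z c (by decide)]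

      · -- k = "endlocation"
        rw [List.foldl_cons]
        by_cases hcond : PySem.Str.strip w ≠ "" ∧ (2 : Int) < y
        · have hstep : stepB (mk3 a b c, mk3i x y z) ("endlocation", w) = (mk3 a w c, mk3i x 2 z) := by
            simp only [stepB, h, getD_mk3i_E]
            rw [if_pos hcond]
            rfl
          rw [hstep, ih a w c x 2 z htl2]
          have e1 : GR (PySem.Dict.mk (("endlocation", w) :: xs')) pvLe 0 y b = GR (PySem.Dict.mk xs') pvLe 0 2 w := by
            rw [show pvLe = ["end", "end_location"] ++ "endlocation" :: ["to", "to_location"] from rfl,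
                GR_cons_alias _ _ _ _ _ (by decide) (by decide) htl,
                if_pos ⟨hcond.1, by norm_num [hcond.2]⟩]
            norm_num
          rw [e1,
            GR_cons_notmem "endlocation" w xs' pvLs 0 x a (by decide),
            GR_cons_notmem "endlocation" w xs' pvLp 0 z c (by decide)]
        · have hstep : stepB (mk3 a b c, mk3i x y z) ("endlocation", w) = (mk3 a b c, mk3i x y z) := by
            simp only [stepB, h, getD_mk3i_E]
            rw [if_neg hcond]
          rw [hstep, ih a b c x y z htl2]
          have e1 : GR (PySem.Dict.mk (("endlocation", w) :: xs')) pvLe 0 y b = GR (PySem.Dict.mk xs') pvLe 0 y b := by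
            rw [show pvLe = ["end", "end_location"] ++ "endlocation" :: ["to", "to_location"] from rfl,
                GR_cons_alias _ _ _ _ _ (by decide) (by decide) htl,
                if_neg (fun hc => hcond ⟨hc.1, by have := hc.2; norm_num at this; omega⟩)]
          rw [e1,
            GR_cons_notmem "endlocation" w xs' pvLs 0 x a (by decide),
            GR_cons_notmem "endlocation" w xs' pvLp 0 z c (by decide)]

      · -- k = "to"
        rw [List.foldl_cons]
        by_cases hcond : PySem.Str.strip w ≠ "" ∧ (3 : Int) < y
        · have hstep : stepB (mk3 a b c, mk3i x y z) ("to", w) = (mk3 a w c, mk3i x 3 z) := by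
            simp only [stepB, h, getD_mk3i_E]
            rw [if_pos hcond]
            rfl
          rw [hstep, ih a w c x 3 z htl2]
          have e1 : GR (PySem.Dict.mk (("to", w) :: xs')) pvLe 0 y b = GR (PySem.Dict.mk xs') pvLe 0 3 w := by
            rw [show pvLe = ["end", "end_location", "endlocation"] ++ "to" :: ["to_location"] from rfl,
                GR_cons_alias _ _ _ _ _ (by decide) (by decide) htl,
                if_pos ⟨hcond.1, by norm_num [hcond.2]⟩]
            norm_num
          rw [e1,
            GR_cons_notmem "to" w xs' pvLs 0 x a (by decide),
            GR_cons_notmem "to" w xs' pvLp 0 z c (by decide)]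
        · have hstep : stepB (mk3 a b c, mk3i x y z) ("to", w) = (mk3 a b c, mk3i x y z) := by
            simp only [stepB, h, getD_mk3i_E]
            rw [if_neg hcond]
          rw [hstep, ih a b c x y z htl2]
          have e1 : GR (PySem.Dict.mk (("to", w) :: xs')) pvLe 0 y b = GR (PySem.Dict.mk xs') pvLe 0 y b := by
            rw [show pvLe = ["end", "end_location", "endlocation"] ++ "to" :: ["to_location"] from rfl,
                GR_cons_alias _ _ _ _ _ (by decide) (by decide) htl,
                if_neg (fun hc => hcond ⟨hc.1, by have := hc.2; norm_num at this; omega⟩)]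
          rw [e1,
            GR_cons_notmem "to" w xs' pvLs 0 x a (by decide),
            GR_cons_notmem "to" w xs' pvLp 0 z c (by decide)]

      · -- k = "to_location"
        rw [List.foldl_cons]
        by_cases hcond : PySem.Str.strip w ≠ "" ∧ (4 : Int) < y
        · have hstep : stepB (mk3 a b c, mk3i x y z) ("to_location", w) = (mk3 a w c, mk3i x 4 z) := by
            simp only [stepB, h, getD_mk3i_E]
            rw [if_pos hcond]
            rfl
          rw [hstep, ih a w c x 4 z htl2]
          have e1 : GR (PySem.Dict.mk (("to_location", w) :: xs')) pvLe 0 y b = GR (PySem.Dict.mk xs') pvLe 0 4 w := by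
            rw [show pvLe = ["end", "end_location", "endlocation", "to"] ++ "to_location" :: [] from rfl,
                GR_cons_alias _ _ _ _ _ (by decide) (by decide) htl,
                if_pos ⟨hcond.1, by norm_num [hcond.2]⟩]
            norm_num
          rw [e1,
            GR_cons_notmem "to_location" w xs' pvLs 0 x a (by decide),
            GR_cons_notmem "to_location" w xs' pvLp 0 z c (by decide)]
        · have hstep : stepB (mk3 a b c, mk3i x y z) ("to_location", w) = (mk3 a b c, mk3i x y z) := by
            simp only [stepB, h, getD_mk3i_E]
            rw [if_neg hcond]
          rw [hstep, ih a b c x y z htl2]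
          have e1 : GR (PySem.Dict.mk (("to_location", w) :: xs')) pvLe 0 y b = GR (PySem.Dict.mk xs') pvLe 0 y b := by
            rw [show pvLe = ["end", "end_location", "endlocation", "to"] ++ "to_location" :: [] from rfl,
                GR_cons_alias _ _ _ _ _ (by decide) (by decide) htl,
                if_neg (fun hc => hcond ⟨hc.1, by have := hc.2; norm_num at this; omega⟩)]
          rw [e1,
            GR_cons_notmem "to_location" w xs' pvLs 0 x a (by decide),
            GR_cons_notmem "to_location" w xs' pvLp 0 z c (by decide)]

      · -- k = "price"
        rw [List.foldl_cons]
        by_cases hcond : PySem.Str.strip w ≠ "" ∧ (0 : Int) < z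
        · have hstep : stepB (mk3 a b c, mk3i x y z) ("price", w) = (mk3 a b w, mk3i x y 0) := by
            simp only [stepB, h, getD_mk3i_P]
            rw [if_pos hcond]
            rfl
          rw [hstep, ih a b w x y 0 htl2]
          have e1 : GR (PySem.Dict.mk (("price", w) :: xs')) pvLp 0 z c = GR (PySem.Dict.mk xs') pvLp 0 0 w := by
            rw [show pvLp = [] ++ "price" :: ["amount", "fare", "cost"] from rfl,
                GR_cons_alias _ _ _ _ _ (by decide) (by decide) htl,
                if_pos ⟨hcond.1, by norm_num [hcond.2]⟩]
            norm_num
          rw [e1,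
            GR_cons_notmem "price" w xs' pvLs 0 x a (by decide),
            GR_cons_notmem "price" w xs' pvLe 0 y b (by decide)]
        · have hstep : stepB (mk3 a b c, mk3i x y z) ("price", w) = (mk3 a b c, mk3i x y z) := by
            simp only [stepB, h, getD_mk3i_P]
            rw [if_neg hcond]
          rw [hstep, ih a b c x y z htl2]
          have e1 : GR (PySem.Dict.mk (("price", w) :: xs')) pvLp 0 z c = GR (PySem.Dict.mk xs') pvLp 0 z c := by
            rw [show pvLp = [] ++ "price" :: ["amount", "fare", "cost"] from rfl,
                GR_cons_alias _ _ _ _ _ (by decide) (by decide) htl,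
                if_neg (fun hc => hcond ⟨hc.1, by have := hc.2; norm_num at this; omega⟩)]
          rw [e1,
            GR_cons_notmem "price" w xs' pvLs 0 x a (by decide),
            GR_cons_notmem "price" w xs' pvLe 0 y b (by decide)]

      · -- k = "amount"
        rw [List.foldl_cons]
        by_cases hcond : PySem.Str.strip w ≠ "" ∧ (1 : Int) < z
        · have hstep : stepB (mk3 a b c, mk3i x y z) ("amount", w) = (mk3 a b w, mk3i x y 1) := by
            simp only [stepB, h, getD_mk3i_P]
            rw [if_pos hcond]
            rfl
          rw [hstep, ih a b w x y 1 htl2]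
          have e1 : GR (PySem.Dict.mk (("amount", w) :: xs')) pvLp 0 z c = GR (PySem.Dict.mk xs') pvLp 0 1 w := by
            rw [show pvLp = ["price"] ++ "amount" :: ["fare", "cost"] from rfl,
                GR_cons_alias _ _ _ _ _ (by decide) (by decide) htl,
                if_pos ⟨hcond.1, by norm_num [hcond.2]⟩]
            norm_num
          rw [e1,
            GR_cons_notmem "amount" w xs' pvLs 0 x a (by decide),
            GR_cons_notmem "amount" w xs' pvLe 0 y b (by decide)]
        · have hstep : stepB (mk3 a b c, mk3i x y z) ("amount", w) = (mk3 a b c, mk3i x y z) := by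
            simp only [stepB, h, getD_mk3i_P]
            rw [if_neg hcond]
          rw [hstep, ih a b c x y z htl2]
          have e1 : GR (PySem.Dict.mk (("amount", w) :: xs')) pvLp 0 z c = GR (PySem.Dict.mk xs') pvLp 0 z c := by
            rw [show pvLp = ["price"] ++ "amount" :: ["fare", "cost"] from rfl,
                GR_cons_alias _ _ _ _ _ (by decide) (by decide) htl,
                if_neg (fun hc => hcond ⟨hc.1, by have := hc.2; norm_num at this; omega⟩)]
          rw [e1,
            GR_cons_notmem "amount" w xs' pvLs 0 x a (by decide),
            GR_cons_notmem "amount" w xs' pvLe 0 y b (by decide)]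

      · -- k = "fare"
        rw [List.foldl_cons]
        by_cases hcond : PySem.Str.strip w ≠ "" ∧ (2 : Int) < z
        · have hstep : stepB (mk3 a b c, mk3i x y z) ("fare", w) = (mk3 a b w, mk3i x y 2) := by
            simp only [stepB, h, getD_mk3i_P]
            rw [if_pos hcond]
            rfl
          rw [hstep, ih a b w x y 2 htl2]
          have e1 : GR (PySem.Dict.mk (("fare", w) :: xs')) pvLp 0 z c = GR (PySem.Dict.mk xs') pvLp 0 2 w := by
            rw [show pvLp = ["price", "amount"] ++ "fare" :: ["cost"] from rfl,
                GR_cons_alias _ _ _ _ _ (by decide) (by decide) htl,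
                if_pos ⟨hcond.1, by norm_num [hcond.2]⟩]
            norm_num
          rw [e1,
            GR_cons_notmem "fare" w xs' pvLs 0 x a (by decide),
            GR_cons_notmem "fare" w xs' pvLe 0 y b (by decide)]
        · have hstep : stepB (mk3 a b c, mk3i x y z) ("fare", w) = (mk3 a b c, mk3i x y z) := by
            simp only [stepB, h, getD_mk3i_P]
            rw [if_neg hcond]
          rw [hstep, ih a b c x y z htl2]
          have e1 : GR (PySem.Dict.mk (("fare", w) :: xs')) pvLp 0 z c = GR (PySem.Dict.mk xs') pvLp 0 z c := by
            rw [show pvLp = ["price", "amount"] ++ "fare" :: ["cost"] from rfl,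
                GR_cons_alias _ _ _ _ _ (by decide) (by decide) htl,
                if_neg (fun hc => hcond ⟨hc.1, by have := hc.2; norm_num at this; omega⟩)]
          rw [e1,
            GR_cons_notmem "fare" w xs' pvLs 0 x a (by decide),
            GR_cons_notmem "fare" w xs' pvLe 0 y b (by decide)]

      · -- k = "cost"
        rw [List.foldl_cons]
        by_cases hcond : PySem.Str.strip w ≠ "" ∧ (3 : Int) < z
        · have hstep : stepB (mk3 a b c, mk3i x y z) ("cost", w) = (mk3 a b w, mk3i x y 3) := by
            simp only [stepB, h, getD_mk3i_P]
            rw [if_pos hcond]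
            rfl
          rw [hstep, ih a b w x y 3 htl2]
          have e1 : GR (PySem.Dict.mk (("cost", w) :: xs')) pvLp 0 z c = GR (PySem.Dict.mk xs') pvLp 0 3 w := by
            rw [show pvLp = ["price", "amount", "fare"] ++ "cost" :: [] from rfl,
                GR_cons_alias _ _ _ _ _ (by decide) (by decide) htl,
                if_pos ⟨hcond.1, by norm_num [hcond.2]⟩]
            norm_num
          rw [e1,
            GR_cons_notmem "cost" w xs' pvLs 0 x a (by decide),
            GR_cons_notmem "cost" w xs' pvLe 0 y b (by decide)]
        · have hstep : stepB (mk3 a b c, mk3i x y z) ("cost", w) = (mk3 a b c, mk3i x y z) := by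
            simp only [stepB, h, getD_mk3i_P]
            rw [if_neg hcond]
          rw [hstep, ih a b c x y z htl2]
          have e1 : GR (PySem.Dict.mk (("cost", w) :: xs')) pvLp 0 z c = GR (PySem.Dict.mk xs') pvLp 0 z c := by
            rw [show pvLp = ["price", "amount", "fare"] ++ "cost" :: [] from rfl,
                GR_cons_alias _ _ _ _ _ (by decide) (by decide) htl,
                if_neg (fun hc => hcond ⟨hc.1, by have := hc.2; norm_num at this; omega⟩)]
          rw [e1,
            GR_cons_notmem "cost" w xs' pvLs 0 x a (by decide),
            GR_cons_notmem "cost" w xs' pvLe 0 y b (by decide)]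

theorem ofList3 : (PySem.Dict.ofList [("start_location", ""), ("end_location", ""), ("price", "")] :
    PySem.Dict String String) = mk3 "" "" "" := rfl
theorem ofList3i : (PySem.Dict.ofList [("start_location", (1000000000 : Int)), ("end_location", 1000000000), ("price", 1000000000)] :
    PySem.Dict String Int) = mk3i 1000000000 1000000000 1000000000 := rfl

theorem canonOf_nodup (record : List (String × String)) :
    ((canonOf record).items.map Prod.fst).Nodup := by
  have h := PySem.Dict.nodup_keys_foldl_insert_key record (fun kv => canonKey kv.1)
    (fun d kv => kv.2) PySem.Dict.empty PySem.Dict.nodup_keys_empty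
  simpa [PySem.Dict.keys, canonOf] using h

theorem A_shape (record : List (String × String)) :
    normalize_record_py record =
      (mk3 ((findAlias (canonOf record) pvLs).getD "")
           ((findAlias (canonOf record) pvLe).getD "")
           ((findAlias (canonOf record) pvLp).getD "")).items := by
  simp only [normalize_record_py, keyMapPV, List.foldl_cons, List.foldl_nil, ofList3]
  rw [show (["start", "start_location", "startlocation", "from", "from_location"] : List String) = pvLs from rfl,
      show (["end", "end_location", "endlocation", "to", "to_location"] : List String) = pvLe from rfl,
      show (["price", "amount", "fare", "cost"] : List String) = pvLp from rfl]
  cases h1 : findAlias (canonOf record) pvLs <;>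
    cases h2 : findAlias (canonOf record) pvLe <;>
      cases h3 : findAlias (canonOf record) pvLp <;>
        simp [ins_mk3_S, ins_mk3_E, ins_mk3_P]

theorem B_shape (record : List (String × String)) :
    normalize_record_py_alt record =
      (mk3 (GR (canonOf record) pvLs 0 1000000000 "").1
           (GR (canonOf record) pvLe 0 1000000000 "").1
           (GR (canonOf record) pvLp 0 1000000000 "").1).items := by
  simp only [normalize_record_py_alt, ofList3, ofList3i]
  rw [foldB_eq (canonOf record).items "" "" "" 1000000000 1000000000 1000000000 (canonOf_nodup record)]

-- ===== VERDICT (by name: the statement is the Claim_ definition above) =====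
theorem normalize_record_py_spec : Claim_equal_normalize_record_py := by
  intro record _ _
  unfold Spec_normalize_record_py
  rw [A_shape, B_shape,
      GR_eq_findAlias (canonOf record) pvLs 0 1000000000 "" (by norm_num [pvLs]),
      GR_eq_findAlias (canonOf record) pvLe 0 1000000000 "" (by norm_num [pvLe]),
      GR_eq_findAlias (canonOf record) pvLp 0 1000000000 "" (by norm_num [pvLp])]
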